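-- pv_equiv track=rewrite | github.com/NDeeSeee/POSEIDON | Master_Project/check_bam_discrepancies.py | map_bam_ids_to_sample_list
-- ===== SOURCE A (Python) =====
-- from typing import List, Set, Tuple, Optional
--
-- def map_bam_ids_to_sample_list(bam_ids: Set[str], sample_ids: Set[str]) -> Tuple[Set[str], Set[str]]:
--     """
--     Attempt to map bam-derived names to sample IDs using exact or prefix matches.
--     Returns (mapped_ids_in_sample_list, unmapped_bam_ids_as_is)
--     """
--     mapped: Set[str] = set()
--     unmapped: Set[str] = set()
--     if not sample_ids:
--         # Nothing to map to
--         return set(), set(bam_ids)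
--
--     # Pre-compute for speed
--     sample_ids_sorted = sorted(sample_ids, key=len, reverse=True)
--
--     for bid in bam_ids:
--         if bid in sample_ids:
--             mapped.add(bid)
--             continue
--         # Prefer the longest sample id that is a prefix of the bam id
--         best: Optional[str] = None
--         for sid in sample_ids_sorted:
--             if bid.startswith(sid) or sid.startswith(bid):
--                 best = sid
--                 break
--         if best is not None:
--             mapped.add(best)
--         else:
--             unmapped.add(bid)
--     return mapped, unmapped
-- ===== SOURCE B (Python) =====
-- from typing import List, Set, Tuple, Optional
--
-- def map_bam_ids_to_sample_list(bam_ids: Set[str], sample_ids: Set[str]) -> Tuple[Set[str], Set[str]]: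
--     """
--     Same mapping without sorting the sample ids: for each bam id a single pass
--     over sample_ids keeps the longest matching sample id (first one on ties).
--     """
--     if not sample_ids:
--         return set(), set(bam_ids)
--
--     def choice(bid):
--         if bid in sample_ids:
--             return bid
--         best = None
--         for sid in sample_ids:
--             if (bid.startswith(sid) or sid.startswith(bid)) and (best is None or len(best) < len(sid)):
--                 best = sid
--         return best
--
--     choices = [(bid, choice(bid)) for bid in bam_ids]
--     mapped = {c for _, c in choices if c is not None}
--     unmapped = {b for b, c in choices if c is None}
--     return mapped, unmapped
-- ===== Notes on version B (the rewrite author's own statement) =====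
-- stated objective: alternative
-- what changed: B removes A's length-descending stable sort of sample_ids and the first-match/break scan, replacing them with a single fold over the unsorted sample_ids that keeps the longest matching sample id (first on ties), and builds the two result sets from a per-bam choice function instead of A's interleaved two-set accumulation.
import Mathlib
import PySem

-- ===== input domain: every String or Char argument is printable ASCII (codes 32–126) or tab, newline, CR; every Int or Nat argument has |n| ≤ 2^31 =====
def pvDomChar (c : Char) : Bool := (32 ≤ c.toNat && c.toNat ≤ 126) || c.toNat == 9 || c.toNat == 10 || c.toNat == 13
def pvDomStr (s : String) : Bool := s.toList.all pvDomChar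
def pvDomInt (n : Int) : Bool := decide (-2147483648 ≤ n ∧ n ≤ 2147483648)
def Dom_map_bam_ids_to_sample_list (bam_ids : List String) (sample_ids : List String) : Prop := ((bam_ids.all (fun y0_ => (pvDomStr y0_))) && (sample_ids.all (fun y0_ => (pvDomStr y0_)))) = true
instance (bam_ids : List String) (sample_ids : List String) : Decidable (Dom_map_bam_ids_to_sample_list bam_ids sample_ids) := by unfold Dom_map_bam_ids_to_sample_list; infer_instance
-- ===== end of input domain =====

-- B drops A's length-descending sort of sample_ids: per bam id a single fold over
-- sample_ids keeps the longest matching sample id (alternative decomposition; no speed claim).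


-- ===== PORT A =====
-- bid.startswith(sid) or sid.startswith(bid)
def pvMatch (bid sid : String) : Bool :=
  PySem.Str.startswith bid sid || PySem.Str.startswith sid bid

-- A's inner loop: first matching sid in the sorted list, break on hit
def pvFirstMatch (bid : String) : List String → Option String
  | [] => none
  | sid :: rest => if pvMatch bid sid then some sid else pvFirstMatch bid rest

def map_bam_ids_to_sample_list (bam_ids : List String) (sample_ids : List String) : List String × List String :=
  if sample_ids.isEmpty then ([], PySem.Set.ofList bam_ids)
  else
    let sample_ids_sorted := PySem.List.sorted sample_ids (fun s => PySem.Str.len s) true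
    bam_ids.foldl (fun (acc : List String × List String) bid =>
      if sample_ids.contains bid then (PySem.Set.add acc.1 bid, acc.2)
      else
        match pvFirstMatch bid sample_ids_sorted with
        | some best => (PySem.Set.add acc.1 best, acc.2)
        | none => (acc.1, PySem.Set.add acc.2 bid)) ([], [])

-- ===== PORT B =====
-- (bid.startswith(sid) or sid.startswith(bid)), B's copy
def pvMatchB (bid sid : String) : Bool :=
  PySem.Str.startswith bid sid || PySem.Str.startswith sid bid

-- B's choice(bid): exact hit, else one fold over the unsorted sample_ids keeping the longest match
def pvChoice (sample_ids : List String) (bid : String) : Option String :=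
  if sample_ids.contains bid then some bid
  else
    sample_ids.foldl (fun best sid =>
      if pvMatchB bid sid &&
         (match best with
          | none => true
          | some b => decide (PySem.Str.len b < PySem.Str.len sid))
      then some sid else best) none

def map_bam_ids_to_sample_list_alt (bam_ids : List String) (sample_ids : List String) : List String × List String :=
  if sample_ids.isEmpty then ([], PySem.Set.ofList bam_ids)
  else
    let choices := bam_ids.map (fun bid => (bid, pvChoice sample_ids bid))
    (PySem.Set.ofList (choices.filterMap (fun pc => pc.2)),
     PySem.Set.ofList ((choices.filter (fun pc => pc.2 = none)).map (fun pc => pc.1)))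

-- ===== PRECONDITION & SPEC =====
def Spec_map_bam_ids_to_sample_list (bam_ids : List String) (sample_ids : List String) (out : List String × List String) : Prop := out = map_bam_ids_to_sample_list_alt bam_ids sample_ids
instance (bam_ids : List String) (sample_ids : List String) (out : List String × List String) : Decidable (Spec_map_bam_ids_to_sample_list bam_ids sample_ids out) := by unfold Spec_map_bam_ids_to_sample_list; infer_instance

-- ===== CLAIM (what is proved, stated in full; the proofs are below) =====
def Claim_equal_map_bam_ids_to_sample_list : Prop := ∀ (bam_ids : List String) (sample_ids : List String), Dom_map_bam_ids_to_sample_list bam_ids sample_ids → Spec_map_bam_ids_to_sample_list bam_ids sample_ids (map_bam_ids_to_sample_list bam_ids sample_ids)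

-- ===== LEMMAS AND PROOFS =====

-- B's fold step, abstracted over the match predicate p (lengths normalized to String.length)
def pvStep (p : String → Bool) (best : Option String) (sid : String) : Option String :=
  if p sid &&
     (match best with
      | none => true
      | some b => decide (b.length < sid.length))
  then some sid else best

-- pvFirstMatch is List.find?
theorem pvFirstMatch_eq_find? (bid : String) (l : List String) :
    pvFirstMatch bid l = l.find? (pvMatch bid) := by
  induction l with
  | nil => rfl
  | cons sid rest ih =>
    rw [List.find?_cons]
    by_cases h : pvMatch bid sid <;> simp_all [pvFirstMatch]

-- inserting x into a length-descending list commutes with find?/pvStep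
theorem find?_insertBy (p : String → Bool) (x : String) (ys : List String)
    (hdesc : ys.Pairwise (fun a b => b.length ≤ a.length)) :
    (PySem.List.insertBy (fun a b => decide (b.length < a.length)) x ys).find? p
      = pvStep p (ys.find? p) x := by
  induction ys with
  | nil =>
    simp only [PySem.List.insertBy, pvStep, List.find?]
    cases hp : p x <;> simp
  | cons y t ih =>
    have hdt : t.Pairwise (fun a b => b.length ≤ a.length) := hdesc.tail
    have hy : ∀ b ∈ t, b.length ≤ y.length := (List.pairwise_cons.mp hdesc).1
    by_cases hlt : y.length < x.length
    · -- x goes in front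
      have hins : PySem.List.insertBy (fun a b => decide (b.length < a.length)) x (y :: t)
          = x :: y :: t := by
        show (if decide (y.length < x.length) = true then _ else _) = _
        rw [if_pos (by simpa using hlt)]
      rw [hins]
      rcases hfind : (y :: t).find? p with _ | b
      · have hpyt := hfind
        rw [List.find?_cons] at hpyt
        cases hp : p x
        · rw [List.find?_cons, hp]; simp [hfind, pvStep, hp]
        · rw [List.find?_cons, hp]; simp [pvStep, hp]
      · have hb : b ∈ y :: t := List.mem_of_find?_eq_some hfind
        have hble : b.length ≤ y.length := by
          rcases List.mem_cons.mp hb with h | h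
          · exact h ▸ le_refl _
          · exact hy b h
        have hbx : b.length < x.length := lt_of_le_of_lt hble hlt
        cases hp : p x
        · rw [List.find?_cons, hp, hfind]; simp [pvStep, hp]
        · rw [List.find?_cons, hp]; simp [pvStep, hp, hbx]
    · -- x stays behind y
      have hins : PySem.List.insertBy (fun a b => decide (b.length < a.length)) x (y :: t)
          = y :: PySem.List.insertBy (fun a b => decide (b.length < a.length)) x t := by
        show (if decide (y.length < x.length) = true then _ else _) = _
        rw [if_neg (by simpa using hlt)]
      rw [hins]
      cases hpy : p y
      · rw [List.find?_cons, hpy, List.find?_cons, hpy, ih hdt]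
      · rw [List.find?_cons, hpy, List.find?_cons, hpy]
        simp [pvStep, Nat.not_lt.mpr (Nat.not_lt.mp hlt)]

-- the core: first match in the length-descending stable sort = fold keeping strictly longer matches
theorem find?_sorted_len_eq_foldl (p : String → Bool) (l : List String) :
    (PySem.List.sorted l (fun s : String => s.length) true).find? p = l.foldl (pvStep p) none := by
  induction l using List.reverseRecOn with
  | nil => rfl
  | append_singleton l x ih =>
    rw [PySem.List.sorted_rev_eq_foldl_insertBy] at ih ⊢
    rw [List.foldl_append, List.foldl_append]
    simp only [List.foldl_cons, List.foldl_nil]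
    rw [find?_insertBy p x _ (by
      have := PySem.List.sorted_pairwise_rev l (fun s : String => s.length)
      rwa [PySem.List.sorted_rev_eq_foldl_insertBy] at this), ih]

-- the same with Python's len as the sort key (the form the ports use)
theorem find?_sorted_eq_foldl (p : String → Bool) (l : List String) :
    (PySem.List.sorted l (fun s => PySem.Str.len s) true).find? p = l.foldl (pvStep p) none := by
  have hkey : PySem.List.sorted l (fun s => PySem.Str.len s) true
      = PySem.List.sorted l (fun s : String => s.length) true := by
    simp [PySem.List.sorted]
  rw [hkey, find?_sorted_len_eq_foldl]

-- per-bam choices agree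
theorem choice_agree (sample_ids : List String) (bid : String) :
    (if sample_ids.contains bid then some bid
     else pvFirstMatch bid (PySem.List.sorted sample_ids (fun s => PySem.Str.len s) true))
    = pvChoice sample_ids bid := by
  by_cases h : bid ∈ sample_ids
  · simp [pvChoice, h]
  · simp only [pvChoice, List.contains_eq_mem, h, decide_false, Bool.false_eq_true, if_false]
    rw [pvFirstMatch_eq_find?, find?_sorted_eq_foldl]
    congr 1
    funext best sid
    cases best <;> simp [pvStep, pvMatch, pvMatchB]

-- A's interleaved two-set fold = B's two comprehensions, generalized over accumulators
theorem fold_split (c : String → Option String) (bids : List String)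
    (m u : List String) :
    (bids.foldl (fun (acc : List String × List String) bid =>
        match c bid with
        | some v => (PySem.Set.add acc.1 v, acc.2)
        | none => (acc.1, PySem.Set.add acc.2 bid)) (m, u))
    = ((bids.filterMap c).foldl PySem.Set.add m,
       (bids.filter (fun b => c b = none)).foldl PySem.Set.add u) := by
  induction bids generalizing m u with
  | nil => rfl
  | cons bid rest ih =>
    rcases hc : c bid with _ | v
    · simp [List.foldl_cons, hc, ih]
    · simp [List.foldl_cons, hc, ih]

-- ===== VERDICT (by name: the statement is the Claim_ definition above) =====
theorem map_bam_ids_to_sample_list_spec : Claim_equal_map_bam_ids_to_sample_list := by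
  intro bam_ids sample_ids _
  unfold Spec_map_bam_ids_to_sample_list
  unfold map_bam_ids_to_sample_list map_bam_ids_to_sample_list_alt
  by_cases he : sample_ids.isEmpty
  · simp [he]
  · simp only [he, if_false, Bool.false_eq_true]
    have hstep : ∀ (acc : List String × List String) (bid : String),
        (if sample_ids.contains bid then (PySem.Set.add acc.1 bid, acc.2)
         else
           match pvFirstMatch bid (PySem.List.sorted sample_ids (fun s => PySem.Str.len s) true) with
           | some best => (PySem.Set.add acc.1 best, acc.2)
           | none => (acc.1, PySem.Set.add acc.2 bid))
        = (match pvChoice sample_ids bid with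
           | some v => (PySem.Set.add acc.1 v, acc.2)
           | none => (acc.1, PySem.Set.add acc.2 bid)) := by
      intro acc bid
      rw [← choice_agree sample_ids bid]
      by_cases hm : bid ∈ sample_ids
      · simp [hm]
      · simp only [List.contains_eq_mem, hm, decide_false, Bool.false_eq_true, if_false]
    calc bam_ids.foldl (fun (acc : List String × List String) bid =>
            if sample_ids.contains bid then (PySem.Set.add acc.1 bid, acc.2)
            else
              match pvFirstMatch bid (PySem.List.sorted sample_ids (fun s => PySem.Str.len s) true) with
              | some best => (PySem.Set.add acc.1 best, acc.2)
              | none => (acc.1, PySem.Set.add acc.2 bid)) ([], [])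
        = bam_ids.foldl (fun (acc : List String × List String) bid =>
            match pvChoice sample_ids bid with
            | some v => (PySem.Set.add acc.1 v, acc.2)
            | none => (acc.1, PySem.Set.add acc.2 bid)) ([], []) := by
          have hfun : (fun (acc : List String × List String) bid =>
              if sample_ids.contains bid then (PySem.Set.add acc.1 bid, acc.2)
              else
                match pvFirstMatch bid (PySem.List.sorted sample_ids (fun s => PySem.Str.len s) true) with
                | some best => (PySem.Set.add acc.1 best, acc.2)
                | none => (acc.1, PySem.Set.add acc.2 bid))
              = (fun (acc : List String × List String) bid =>
              match pvChoice sample_ids bid with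
              | some v => (PySem.Set.add acc.1 v, acc.2)
              | none => (acc.1, PySem.Set.add acc.2 bid)) := by
            funext acc bid; exact hstep acc bid
          rw [hfun]
      _ = _ := by
          rw [fold_split (pvChoice sample_ids) bam_ids [] []]
          simp [PySem.Set.ofList_eq_foldl, List.filterMap_map, List.filter_map,
                List.map_map, Function.comp_def]
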